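-- pv_equiv track=rewrite | github.com/AyanS2004/Alpha-Signal-Generator | alpha_signal_engine/realtime_feed.py | get_combined_signal
-- ===== SOURCE A (Python) =====
-- from typing import Dict, List, Optional, Callable
--
-- def get_combined_signal(signals: Dict) -> int:
--     """
--     Combine multiple signals into a single signal.
--
--     Args:
--         signals: Dictionary of signals
--
--     Returns:
--         Combined signal (-1, 0, 1)
--     """
--     if not signals:
--         return 0
--
--     # Simple majority voting
--     positive_signals = sum(1 for s in signals.values() if s > 0)
--     negative_signals = sum(1 for s in signals.values() if s < 0)
--
--     if positive_signals > negative_signals: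
--         return 1
--     elif negative_signals > positive_signals:
--         return -1
--     else:
--         return 0
-- ===== SOURCE B (Python) =====
-- def get_combined_signal(signals):
--     """Combine multiple signals into a single signal (-1, 0, 1) by
--     Boyer-Moore pair cancellation over the nonzero signal signs:
--     opposite signs cancel one-for-one; whatever sign survives wins.
--     With only two possible symbols (+1/-1) the surviving candidate is
--     exactly the majority sign, and a full cancellation means a tie."""
--     candidate, count = 0, 0
--     for s in signals.values():
--         if s == 0:
--             continue
--         v = 1 if s > 0 else -1
--         if count == 0:
--             candidate, count = v, 1
--         elif v == candidate:
--             count += 1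
--         else:
--             count -= 1
--     return candidate if count > 0 else 0
-- ===== Notes on version B (the rewrite author's own statement) =====
-- stated objective: alternative
-- what changed: Replaces the two counting passes plus three-way comparison with a Boyer-Moore majority-vote pair cancellation over the nonzero signal signs, returning the surviving candidate (or 0 on full cancellation); correct because with only two symbols the survivor is the majority sign.
import Mathlib
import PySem

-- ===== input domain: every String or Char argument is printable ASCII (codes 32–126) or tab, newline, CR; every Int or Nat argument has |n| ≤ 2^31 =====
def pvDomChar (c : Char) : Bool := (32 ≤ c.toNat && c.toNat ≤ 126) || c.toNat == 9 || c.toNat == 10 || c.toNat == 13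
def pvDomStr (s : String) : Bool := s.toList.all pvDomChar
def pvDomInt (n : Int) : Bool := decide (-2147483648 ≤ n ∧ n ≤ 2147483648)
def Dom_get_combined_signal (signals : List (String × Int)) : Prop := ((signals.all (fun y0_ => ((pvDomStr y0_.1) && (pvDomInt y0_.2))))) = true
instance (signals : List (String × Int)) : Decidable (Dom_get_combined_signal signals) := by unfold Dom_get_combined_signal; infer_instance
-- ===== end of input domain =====

-- B replaces A's two counting passes and three-way branch by a Boyer-Moore
-- majority-vote pair cancellation over the nonzero signal signs (objective: alternative).


-- ===== PORT A =====
def get_combined_signal (signals : List (String × Int)) : Int :=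
  if signals = [] then 0
  else
    let positive_signals : Int :=
      signals.foldl (fun acc p => if p.2 > 0 then acc + 1 else acc) 0
    let negative_signals : Int :=
      signals.foldl (fun acc p => if p.2 < 0 then acc + 1 else acc) 0
    if positive_signals > negative_signals then 1
    else if negative_signals > positive_signals then -1
    else 0

-- ===== PORT B =====
-- one Boyer-Moore cancellation step on the state (candidate, count)
def bmStep (st : Int × Int) (p : String × Int) : Int × Int :=
  if p.2 = 0 then st
  else
    let v : Int := if p.2 > 0 then 1 else -1
    if st.2 = 0 then (v, 1)
    else if v = st.1 then (st.1, st.2 + 1)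
    else (st.1, st.2 - 1)

def get_combined_signal_alt (signals : List (String × Int)) : Int :=
  let st := signals.foldl bmStep (0, 0)
  if st.2 > 0 then st.1 else 0

-- ===== PRECONDITION & SPEC =====
def Spec_get_combined_signal (signals : List (String × Int)) (out : Int) : Prop := out = get_combined_signal_alt signals
instance (signals : List (String × Int)) (out : Int) : Decidable (Spec_get_combined_signal signals out) := by unfold Spec_get_combined_signal; infer_instance

-- ===== CLAIM (what is proved, stated in full; the proofs are below) =====
def Claim_equal_get_combined_signal : Prop := ∀ (signals : List (String × Int)), Dom_get_combined_signal signals → Spec_get_combined_signal signals (get_combined_signal signals)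

-- ===== LEMMAS AND PROOFS =====

-- net sign tally of a list, the reference quantity both programs compute the sign of
def netList : List (String × Int) → Int
  | [] => 0
  | p :: t => ((if p.2 > 0 then (1 : Int) else 0) - (if p.2 < 0 then 1 else 0)) + netList t

-- A's two counts (from general accumulators) differ by exactly netList
theorem counts_sub_eq_net (l : List (String × Int)) :
    ∀ (a b : Int),
      l.foldl (fun acc p => if p.2 > 0 then acc + 1 else acc) a
        - l.foldl (fun acc p => if p.2 < 0 then acc + 1 else acc) b
      = a - b + netList l := by
  induction l with
  | nil => intro a b; simp [netList]
  | cons x t ih =>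
      intro a b
      simp only [List.foldl_cons, netList]
      rw [ih]
      split_ifs with h1 h2 <;> omega

-- one cancellation step preserves the invariant and adds x's sign to the tally
theorem bmStep_facts (c n : Int) (x : String × Int) (hn : 0 ≤ n)
    (hc : c = 1 ∨ c = -1 ∨ (c = 0 ∧ n = 0)) :
    0 ≤ (bmStep (c, n) x).2 ∧
    ((bmStep (c, n) x).1 = 1 ∨ (bmStep (c, n) x).1 = -1 ∨
      ((bmStep (c, n) x).1 = 0 ∧ (bmStep (c, n) x).2 = 0)) ∧
    (bmStep (c, n) x).1 * (bmStep (c, n) x).2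
      = c * n + ((if x.2 > 0 then (1 : Int) else 0) - (if x.2 < 0 then 1 else 0)) := by
  rcases hc with hc | hc | ⟨hc, hn0⟩ <;> subst hc <;> (try subst hn0) <;>
    simp only [bmStep] <;> split_ifs <;> refine ⟨?_, ?_, ?_⟩ <;> first | omega | simp_all

-- Boyer-Moore invariant: the signed tally candidate*count tracks netList,
-- count stays nonnegative, and a positive count forces candidate ∈ {1,-1}.
theorem bm_inv (l : List (String × Int)) :
    ∀ (c n : Int), 0 ≤ n → (c = 1 ∨ c = -1 ∨ (c = 0 ∧ n = 0)) →
      0 ≤ (l.foldl bmStep (c, n)).2 ∧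
      ((l.foldl bmStep (c, n)).1 = 1 ∨ (l.foldl bmStep (c, n)).1 = -1 ∨
        ((l.foldl bmStep (c, n)).1 = 0 ∧ (l.foldl bmStep (c, n)).2 = 0)) ∧
      (l.foldl bmStep (c, n)).1 * (l.foldl bmStep (c, n)).2 = c * n + netList l := by
  induction l with
  | nil => intro c n hn hc; simpa [netList] using ⟨hn, hc⟩
  | cons x t ih =>
      intro c n hn hc
      obtain ⟨h1, h2, h3⟩ := bmStep_facts c n x hn hc
      obtain ⟨h1', h2', h3'⟩ := ih (bmStep (c, n) x).1 (bmStep (c, n) x).2 h1 h2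
      simp only [List.foldl_cons, netList, Prod.mk.eta] at *
      exact ⟨h1', h2', by rw [h3', h3]; ring⟩

-- ===== VERDICT (by name: the statement is the Claim_ definition above) =====
theorem get_combined_signal_spec : Claim_equal_get_combined_signal := by
  intro signals _
  unfold Spec_get_combined_signal get_combined_signal get_combined_signal_alt
  cases signals with
  | nil => rfl
  | cons x t =>
      obtain ⟨h1, h2, h3⟩ :=
        bm_inv (x :: t) 0 0 (le_refl 0) (Or.inr (Or.inr ⟨rfl, rfl⟩))
      have hcount := counts_sub_eq_net (x :: t) 0 0
      simp only [reduceCtorEq, if_false]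
      rw [mul_zero, zero_add] at h3
      rcases h2 with h2 | h2 | ⟨h2, h2n⟩ <;> rw [h2] at h3 <;>
        split_ifs <;> omega
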